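-- pv_equiv track=rewrite | github.com/Naradice/finance_process | fprocess/indicaters/technical.py | __create_out_lists
-- ===== SOURCE A (Python) =====
-- def __create_out_lists(elements, column_names):
--     out_elements = []
--     out_columns = []
--     for index in range(0, len(elements)):
--         if column_names[index] is not None:
--             out_elements.append(elements[index])
--             out_columns.append(column_names[index])
--     return out_elements, out_columns
-- ===== SOURCE B (Python) =====
-- def __create_out_lists(elements, column_names):
--     n = len(elements)
--     if n == 0:
--         return [], []
--     if n == 1:
--         c = column_names[0]
--         if c is None:
--             return [], []
--         return [elements[0]], [c]
--     mid = n // 2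
--     left_elements, left_columns = __create_out_lists(elements[:mid], column_names[:mid])
--     right_elements, right_columns = __create_out_lists(elements[mid:], column_names[mid:])
--     return left_elements + right_elements, left_columns + right_columns
-- ===== Notes on version B (the rewrite author's own statement) =====
-- stated objective: alternative
-- what changed: Replaces A's single index loop appending to two lists in lockstep with a divide-and-conquer recursion: split both lists at the midpoint, recurse on each half, and concatenate the two halves' results; base cases handle the empty and singleton lists.
import Mathlib
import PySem

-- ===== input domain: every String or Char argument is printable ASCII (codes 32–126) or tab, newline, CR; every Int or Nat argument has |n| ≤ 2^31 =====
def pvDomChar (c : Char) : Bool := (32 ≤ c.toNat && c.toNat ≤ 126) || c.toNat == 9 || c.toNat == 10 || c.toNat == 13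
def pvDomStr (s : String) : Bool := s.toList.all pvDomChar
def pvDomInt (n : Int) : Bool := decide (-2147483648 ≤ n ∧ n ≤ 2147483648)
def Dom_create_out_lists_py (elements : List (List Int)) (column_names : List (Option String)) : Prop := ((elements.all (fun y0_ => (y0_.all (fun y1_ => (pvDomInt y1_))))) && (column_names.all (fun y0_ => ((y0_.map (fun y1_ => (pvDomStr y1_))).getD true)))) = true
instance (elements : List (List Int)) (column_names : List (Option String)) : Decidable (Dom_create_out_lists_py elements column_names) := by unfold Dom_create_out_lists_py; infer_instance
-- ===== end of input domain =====

-- B replaces A's single lockstep append loop by a divide-and-conquer recursion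
-- (split at the midpoint, recurse, concatenate); alternative structure, same result.

-- ===== PORT A =====
-- for index in range(0, len(elements)): if column_names[index] is not None: append to both
def create_out_lists_py (elements : List (List Int)) (column_names : List (Option String)) : List (List Int) × List String :=
  (PySem.List.pyRange 0 (elements.length : Int) 1).foldl
    (fun acc j =>
      match PySem.List.pyGetD column_names j none with
      | some c => (acc.1 ++ [PySem.List.pyGetD elements j []], acc.2 ++ [c])
      | none => acc)
    ([], [])

-- ===== PORT B =====
-- termination helpers for the midpoint slices (cited by name in decreasing_by)
lemma pv_len_slice_to_half {α : Type} (xs : List α) (h : 2 ≤ xs.length) :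
    (PySem.List.slice xs none (some (PySem.Int.floordiv (xs.length : Int) 2))).length < xs.length := by
  have hm : PySem.Int.floordiv ((xs.length : Int)) 2 = ((xs.length / 2 : Nat) : Int) := by
    exact_mod_cast PySem.Int.floordiv_natCast xs.length 2
  rw [hm, PySem.List.slice_to_natCast]
  simp; omega

lemma pv_len_slice_from_half {α : Type} (xs : List α) (h : 2 ≤ xs.length) :
    (PySem.List.slice xs (some (PySem.Int.floordiv (xs.length : Int) 2)) none).length < xs.length := by
  have hm : PySem.Int.floordiv ((xs.length : Int)) 2 = ((xs.length / 2 : Nat) : Int) := by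
    exact_mod_cast PySem.Int.floordiv_natCast xs.length 2
  rw [hm, PySem.List.slice_from_natCast]
  simp; omega

-- if n == 0: ([], []); if n == 1: look at column_names[0]; else split at mid = n // 2,
-- recurse on both halves and concatenate.  (Python raises IndexError reading
-- column_names[0] on a leaf when column_names is shorter — outside Pre_; the port
-- returns ([], []) there.)
def create_out_lists_py_alt (elements : List (List Int)) (column_names : List (Option String)) : List (List Int) × List String :=
  if _h0 : elements.length = 0 then ([], [])
  else if _h1 : elements.length = 1 then
    match PySem.List.pyGet? elements 0, PySem.List.pyGet? column_names 0 with
    | some e, some (some c) => ([e], [c])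
    | _, _ => ([], [])
  else
    let mid : Int := PySem.Int.floordiv ((elements.length : Int)) 2
    let L := create_out_lists_py_alt (PySem.List.slice elements none (some mid))
                                     (PySem.List.slice column_names none (some mid))
    let R := create_out_lists_py_alt (PySem.List.slice elements (some mid) none)
                                     (PySem.List.slice column_names (some mid) none)
    (L.1 ++ R.1, L.2 ++ R.2)
termination_by elements.length
decreasing_by
  · exact pv_len_slice_to_half elements (by omega)
  · exact pv_len_slice_from_half elements (by omega)

-- ===== PRECONDITION & SPEC =====
-- A indexes column_names[index] for every index below len(elements): it raises IndexError
-- when column_names is shorter than elements, so Pre_ requires len(elements) ≤ len(column_names).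
def Pre_create_out_lists_py (elements : List (List Int)) (column_names : List (Option String)) : Prop :=
  elements.length ≤ column_names.length
instance (elements : List (List Int)) (column_names : List (Option String)) : Decidable (Pre_create_out_lists_py elements column_names) := by unfold Pre_create_out_lists_py; infer_instance
def pvWitness_create_out_lists_py : List (List Int) × List (Option String) :=
  ([[1, 2], [3]], [some "a", none])

def Spec_create_out_lists_py (elements : List (List Int)) (column_names : List (Option String)) (out : List (List Int) × List String) : Prop := out = create_out_lists_py_alt elements column_names
instance (elements : List (List Int)) (column_names : List (Option String)) (out : List (List Int) × List String) : Decidable (Spec_create_out_lists_py elements column_names out) := by unfold Spec_create_out_lists_py; infer_instance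

-- ===== CLAIM =====
def Claim_equal_create_out_lists_py : Prop := ∀ (elements : List (List Int)) (column_names : List (Option String)), Dom_create_out_lists_py elements column_names → Pre_create_out_lists_py elements column_names → Spec_create_out_lists_py elements column_names (create_out_lists_py elements column_names)

-- ===== LEMMAS AND PROOFS =====

-- Closed form both sides are reduced to: filter the zipped pairs, then project.
def pvClosed (elements : List (List Int)) (column_names : List (Option String)) : List (List Int) × List String :=
  (((elements.zip column_names).filter (fun p => p.2.isSome)).map (fun p => p.1),
   ((elements.zip column_names).filter (fun p => p.2.isSome)).map (fun p => p.2.getD ""))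

-- B equals the closed form (strong induction on the length, following B's split).
lemma alt_eq_closed : ∀ (n : Nat) (e : List (List Int)) (cn : List (Option String)),
    e.length = n → e.length ≤ cn.length → create_out_lists_py_alt e cn = pvClosed e cn := by
  intro n
  induction n using Nat.strong_induction_on with
  | _ n ih =>
    intro e cn hlen hpre
    rw [create_out_lists_py_alt]
    by_cases h0 : e.length = 0
    · have he : e = [] := List.length_eq_zero_iff.mp h0
      simp [he, pvClosed]
    · by_cases h1 : e.length = 1
      · obtain ⟨x, hx⟩ := List.length_eq_one_iff.mp h1
        obtain ⟨c, cs, hcn⟩ : ∃ c cs, cn = c :: cs := by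
          cases cn with
          | nil => simp [hx] at hpre
          | cons c cs => exact ⟨c, cs, rfl⟩
        subst hx hcn
        cases c with
        | none => simp [h1, pvClosed, PySem.List.pyGet?, PySem.List.pyIdx?]
        | some s => simp [h1, pvClosed, PySem.List.pyGet?, PySem.List.pyIdx?]
      · simp only [h0, h1, dite_false]
        have h2 : 2 ≤ e.length := by omega
        have hm : PySem.Int.floordiv ((e.length : Int)) 2 = ((e.length / 2 : Nat) : Int) := by
          exact_mod_cast PySem.Int.floordiv_natCast e.length 2
        set m : Nat := e.length / 2 with hmdef
        rw [hm, PySem.List.slice_to_natCast, PySem.List.slice_to_natCast,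
            PySem.List.slice_from_natCast, PySem.List.slice_from_natCast]
        have hmle : m ≤ e.length := Nat.div_le_self _ _
        have hL := ih (e.take m).length (by simp; omega) (e.take m) (cn.take m) rfl
          (by simp; omega)
        have hR := ih (e.drop m).length (by simp; omega) (e.drop m) (cn.drop m) rfl
          (by simp; omega)
        rw [hL, hR]
        have hzip : e.zip cn = (e.take m).zip (cn.take m) ++ (e.drop m).zip (cn.drop m) := by
          rw [← List.zip_append (by simp; omega)]
          simp
        simp [pvClosed, hzip, List.filter_append]
      
-- The zipped-pairs fold equals the closed form, for any accumulator.
lemma fold_pairs_eq (ps : List (List Int × Option String)) :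
    ∀ (accE : List (List Int)) (accC : List String),
      ps.foldl
        (fun acc (p : List Int × Option String) =>
          match p.2 with
          | some c => (acc.1 ++ [p.1], acc.2 ++ [c])
          | none => acc)
        (accE, accC)
      = (accE ++ (ps.filter (fun p => p.2.isSome)).map (fun p => p.1),
         accC ++ (ps.filter (fun p => p.2.isSome)).map (fun p => p.2.getD "")) := by
  induction ps with
  | nil => intro accE accC; simp
  | cons p ps ih =>
    intro accE accC
    cases hp : p.2 with
    | none => simp [List.foldl_cons, hp, ih]
    | some c => simp [List.foldl_cons, hp, ih]

-- A's range-indexed fold is the fold over the zipped list.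
lemma rangefold_eq_zipfold (elements : List (List Int)) (column_names : List (Option String))
    (h : elements.length ≤ column_names.length) :
    create_out_lists_py elements column_names
      = ((elements.zip column_names).foldl
          (fun acc (p : List Int × Option String) =>
            match p.2 with
            | some c => (acc.1 ++ [p.1], acc.2 ++ [c])
            | none => acc)
          ([], [])) := by
  unfold create_out_lists_py
  have hlen : ((elements.zip column_names).length : Int) = (elements.length : Int) := by
    simp [List.length_zip]; omega
  rw [← hlen]
  rw [← PySem.List.foldl_pyRange_zero_pyGetD (elements.zip column_names) ([], none)
        (fun acc (p : List Int × Option String) =>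
          match p.2 with
          | some c => (acc.1 ++ [p.1], acc.2 ++ [c])
          | none => acc) ([], [])]
  apply PySem.List.foldl_congr_mem
  intro acc j hj
  rw [PySem.List.mem_pyRange_one] at hj
  have hj0 : 0 ≤ j := hj.1
  have hjn : j.toNat < (elements.zip column_names).length := by
    have := hj.2; omega
  have hje : j.toNat < elements.length := by simp [List.length_zip] at hjn; omega
  have hjc : j.toNat < column_names.length := by simp [List.length_zip] at hjn; omega
  have h1 : PySem.List.pyGetD (elements.zip column_names) j ([], none)
      = (elements.zip column_names)[j.toNat] := by
    rw [PySem.List.pyGetD_eq_getElem] <;> omega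
  have h2 : PySem.List.pyGetD column_names j none = column_names[j.toNat] := by
    rw [PySem.List.pyGetD_eq_getElem] <;> omega
  have h3 : PySem.List.pyGetD elements j [] = elements[j.toNat] := by
    rw [PySem.List.pyGetD_eq_getElem] <;> omega
  rw [h1, h2, h3, List.getElem_zip]

-- ===== VERDICT =====
theorem create_out_lists_py_spec : Claim_equal_create_out_lists_py := by
  intro elements column_names _ hpre
  unfold Spec_create_out_lists_py
  rw [rangefold_eq_zipfold elements column_names hpre,
      fold_pairs_eq (elements.zip column_names) [] [],
      alt_eq_closed elements.length elements column_names rfl hpre]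
  simp [pvClosed]
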